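-- pv_equiv track=rewrite | github.com/youshen52/algorithm | graph/subgraph/subgraph_isomorphism.py | is_subgraph
-- ===== SOURCE A (Python) =====
-- def is_subgraph(graph, subgraph):
--     for node in subgraph:
--         if node not in graph:
--             return False
--         for neighbor in subgraph[node]:
--             if neighbor not in graph[node]:
--                 return False
--     return True
-- ===== SOURCE B (Python) =====
-- def is_subgraph(graph, subgraph):
--     # Sort-then-merge: flatten both graphs into sorted, deduplicated node and
--     # directed-edge lists, then verify containment with a linear two-pointer scan.
--     def contains(small, big):
--         i = 0
--         for x in small:
--             while i < len(big) and big[i] < x: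
--                 i += 1
--             if i == len(big) or big[i] != x:
--                 return False
--             i += 1
--         return True
--
--     sub_nodes = sorted(set(subgraph))
--     g_nodes = sorted(set(graph))
--     sub_edges = sorted({(n, nb) for n in subgraph for nb in subgraph[n]})
--     g_edges = sorted({(n, nb) for n in graph for nb in graph[n]})
--     return contains(sub_nodes, g_nodes) and contains(sub_edges, g_edges)
-- ===== Notes on version B (the rewrite author's own statement) =====
-- stated objective: alternative
-- what changed: Replaces A's nested membership scans with a sort-then-merge algorithm: both graphs are flattened into sorted deduplicated node and edge lists and containment is decided by a linear two-pointer merge scan, with no membership test inside any loop.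
import Mathlib
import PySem

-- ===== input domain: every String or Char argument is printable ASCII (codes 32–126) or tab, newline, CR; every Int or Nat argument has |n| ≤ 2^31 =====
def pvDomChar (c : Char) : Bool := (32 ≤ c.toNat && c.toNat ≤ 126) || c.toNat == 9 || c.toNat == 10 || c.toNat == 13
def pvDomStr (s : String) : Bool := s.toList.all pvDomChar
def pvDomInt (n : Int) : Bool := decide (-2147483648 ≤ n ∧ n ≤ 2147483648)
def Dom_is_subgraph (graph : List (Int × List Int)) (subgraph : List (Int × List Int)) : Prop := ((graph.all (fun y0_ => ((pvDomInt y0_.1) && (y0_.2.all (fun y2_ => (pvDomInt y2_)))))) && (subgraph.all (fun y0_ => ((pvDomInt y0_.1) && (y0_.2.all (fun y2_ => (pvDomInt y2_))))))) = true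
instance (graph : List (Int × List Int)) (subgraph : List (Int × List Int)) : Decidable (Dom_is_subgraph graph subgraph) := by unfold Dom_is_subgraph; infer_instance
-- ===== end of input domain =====

-- B replaces A's early-exit nested membership scans with a sort-then-merge algorithm:
-- sorted deduplicated node/edge lists checked by a two-pointer merge scan ('alternative', not measured faster).


-- ===== PORT A =====
-- dict lookup graph[x] on the association-list representation: first match
def pvLookup : List (Int × List Int) → Int → Option (List Int)
  | [], _ => none
  | (k, v) :: rest, x => if k == x then some v else pvLookup rest x

-- inner loop: 'for neighbor in subgraph[node]: if neighbor not in graph[node]: return False'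
def pvNbrLoop (gnbrs : List Int) : List Int → Bool
  | [] => true
  | nb :: rest => if gnbrs.contains nb then pvNbrLoop gnbrs rest else false

-- outer loop over subgraph's keys; 'node not in graph' is the none branch;
-- subgraph[node] is the first-match lookup, always present for a visited key (getD [] never fires)
def pvNodeLoop (graph subgraph : List (Int × List Int)) : List (Int × List Int) → Bool
  | [] => true
  | p :: rest =>
    match pvLookup graph p.1 with
    | none => false
    | some gn =>
      if pvNbrLoop gn ((pvLookup subgraph p.1).getD []) then pvNodeLoop graph subgraph rest
      else false

def is_subgraph (graph : List (Int × List Int)) (subgraph : List (Int × List Int)) : Bool :=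
  pvNodeLoop graph subgraph subgraph

-- ===== PORT B =====
-- 'while i < len(big) and big[i] < x: i += 1' — the remaining suffix of big after the pointer
def pvSkip {α : Type} (ltb : α → α → Bool) (x : α) : List α → List α
  | [] => []
  | y :: ys => if ltb y x then pvSkip ltb x ys else y :: ys

-- contains(small, big): two-pointer merge scan over two sorted lists
def pvContains {α : Type} [BEq α] (ltb : α → α → Bool) : List α → List α → Bool
  | [], _ => true
  | x :: xs, big =>
    match pvSkip ltb x big with
    | [] => false                                 -- i == len(big)
    | y :: ys => if y == x then pvContains ltb xs ys else false

-- Python '<' instantiations: on ints, and lexicographic on 2-tuples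
def pvIntLtB (a b : Int) : Bool := decide (a < b)
def pvPairLtB (a b : Int × Int) : Bool := decide (a.1 < b.1) || (a.1 == b.1 && decide (a.2 < b.2))

-- sorted(set(g)) — the sorted deduplicated key list
def pvNodes (g : List (Int × List Int)) : List Int :=
  PySem.List.sorted (PySem.Set.ofList (g.map (·.1))) (fun x => x) false

-- sorted({(n, nb) for n in g for nb in g[n]}) — the sorted deduplicated directed-edge list
def pvEdges (g : List (Int × List Int)) : List (Int × Int) :=
  PySem.List.sorted2
    (PySem.Set.ofList (g.flatMap (fun p => ((pvLookup g p.1).getD []).map (fun nb => (p.1, nb)))))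
    Prod.fst Prod.snd false

def is_subgraph_alt (graph : List (Int × List Int)) (subgraph : List (Int × List Int)) : Bool :=
  pvContains pvIntLtB (pvNodes subgraph) (pvNodes graph)
    && pvContains pvPairLtB (pvEdges subgraph) (pvEdges graph)

-- ===== PRECONDITION & SPEC =====
def Spec_is_subgraph (graph : List (Int × List Int)) (subgraph : List (Int × List Int)) (out : Bool) : Prop := out = is_subgraph_alt graph subgraph
instance (graph : List (Int × List Int)) (subgraph : List (Int × List Int)) (out : Bool) : Decidable (Spec_is_subgraph graph subgraph out) := by unfold Spec_is_subgraph; infer_instance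

-- ===== CLAIM (what is proved, stated in full; the proofs are below) =====
def Claim_equal_is_subgraph : Prop := ∀ (graph : List (Int × List Int)) (subgraph : List (Int × List Int)), Dom_is_subgraph graph subgraph → Spec_is_subgraph graph subgraph (is_subgraph graph subgraph)

-- ===== LEMMAS AND PROOFS =====

-- ---- side A: the nested scan decides the per-entry condition pvCond ----

theorem pvLookup_isSome_iff (g : List (Int × List Int)) (x : Int) :
    (pvLookup g x).isSome ↔ x ∈ g.map (·.1) := by
  induction g with
  | nil => simp [pvLookup]
  | cons p rest ih =>
    obtain ⟨k, v⟩ := p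
    by_cases h : k = x <;> simp [pvLookup, h, ih]
    · omega

theorem pvNbrLoop_iff (gnbrs l : List Int) :
    pvNbrLoop gnbrs l = true ↔ ∀ nb ∈ l, nb ∈ gnbrs := by
  induction l with
  | nil => simp [pvNbrLoop]
  | cons nb rest ih =>
    by_cases h : nb ∈ gnbrs <;> simp [pvNbrLoop, h, ih]

-- the per-entry condition both programs decide
def pvCond (graph subgraph : List (Int × List Int)) (p : Int × List Int) : Prop :=
  p.1 ∈ graph.map (·.1) ∧
    ∀ nb ∈ (pvLookup subgraph p.1).getD [], nb ∈ (pvLookup graph p.1).getD []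

theorem pvNodeLoop_iff (graph subgraph l : List (Int × List Int)) :
    pvNodeLoop graph subgraph l = true ↔ ∀ p ∈ l, pvCond graph subgraph p := by
  induction l with
  | nil => simp [pvNodeLoop]
  | cons p rest ih =>
    rcases hg : pvLookup graph p.1 with _ | gn
    · have : ¬ (pvLookup graph p.1).isSome := by simp [hg]
      rw [pvLookup_isSome_iff] at this
      simp only [pvNodeLoop, hg]
      constructor
      · intro h; cases h
      · intro h
        exact absurd ((h p (by simp)).1) this
    · have hmem : p.1 ∈ graph.map (·.1) := by
        rw [← pvLookup_isSome_iff]; simp [hg]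
      simp only [pvNodeLoop, hg]
      by_cases hn : pvNbrLoop gn ((pvLookup subgraph p.1).getD []) = true
      · simp only [hn, if_true, ih]
        rw [pvNbrLoop_iff] at hn
        constructor
        · intro h q hq
          rcases List.mem_cons.1 hq with hq | hq
          · subst hq; exact ⟨hmem, by simpa [hg] using hn⟩
          · exact h q hq
        · intro h q hq; exact h q (List.mem_cons_of_mem _ hq)
      · have hn' : pvNbrLoop gn ((pvLookup subgraph p.1).getD []) = false := by
          simpa using hn
        rw [hn']
        simp only [Bool.false_eq_true, if_false]
        constructor
        · intro h; exact absurd h (by simp)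
        · intro h
          exfalso; apply hn
          rw [pvNbrLoop_iff]
          intro nb hnb
          simpa [hg] using (h p (by simp)).2 nb hnb

-- ---- side B: the merge scan decides subset on strictly sorted lists ----

theorem pvSkip_suffix {α : Type} (ltb : α → α → Bool) (x : α) (b : List α) :
    (pvSkip ltb x b).IsSuffix b := by
  induction b with
  | nil => simp [pvSkip]
  | cons y ys ih =>
    by_cases h : ltb y x
    · simp only [pvSkip, h, if_true]
      exact ih.trans (List.suffix_cons y ys)
    · simp [pvSkip, h]

theorem pvSkip_pairwise {α : Type} {R : α → α → Prop} (ltb : α → α → Bool) (x : α)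
    {b : List α} (hb : b.Pairwise R) : (pvSkip ltb x b).Pairwise R :=
  hb.sublist (pvSkip_suffix ltb x b).sublist

theorem pvSkip_not_lt {α : Type} {R : α → α → Prop} (ltb : α → α → Bool)
    (hR : ∀ a b, ltb a b = true ↔ R a b)
    (htr : ∀ a b c, R a b → R b c → R a c) (x : α) :
    ∀ {b : List α}, b.Pairwise R → ∀ z ∈ pvSkip ltb x b, ¬ R z x := by
  intro b
  induction b with
  | nil => intro _ z hz; simp [pvSkip] at hz
  | cons y ys ih =>
    intro hb z hz
    rcases List.pairwise_cons.1 hb with ⟨hy, hys⟩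
    by_cases h : ltb y x
    · simp only [pvSkip, h, if_true] at hz
      exact ih hys z hz
    · simp only [pvSkip, h] at hz
      have hyx : ¬ R y x := fun hc => h ((hR y x).2 hc)
      rcases List.mem_cons.1 hz with rfl | hz
      · exact hyx
      · exact fun hc => hyx (htr y z x (hy z hz) hc)

theorem pvSkip_mem {α : Type} {R : α → α → Prop} (ltb : α → α → Bool)
    (hR : ∀ a b, ltb a b = true ↔ R a b) (x z : α) :
    ∀ {b : List α}, z ∈ b → ¬ R z x → z ∈ pvSkip ltb x b := by
  intro b
  induction b with
  | nil => intro hz; simp at hz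
  | cons y ys ih =>
    intro hz hnz
    by_cases h : ltb y x
    · simp only [pvSkip, h, if_true]
      rcases List.mem_cons.1 hz with rfl | hz
      · exact absurd ((hR z x).1 h) hnz
      · exact ih hz hnz
    · simpa [pvSkip, h] using hz

theorem pvContains_iff {α : Type} [BEq α] [LawfulBEq α] {R : α → α → Prop}
    (ltb : α → α → Bool)
    (hR : ∀ a b, ltb a b = true ↔ R a b)
    (htr : ∀ a b c, R a b → R b c → R a c)
    (hirr : ∀ a, ¬ R a a) :
    ∀ (small big : List α), small.Pairwise R → big.Pairwise R →
      (pvContains ltb small big = true ↔ ∀ x ∈ small, x ∈ big) := by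
  intro small
  induction small with
  | nil => intro big _ _; simp [pvContains]
  | cons x xs ih =>
    intro big hs hb
    rcases List.pairwise_cons.1 hs with ⟨hx, hxs⟩
    have hskip_pw : (pvSkip ltb x big).Pairwise R := pvSkip_pairwise ltb x hb
    have hskip_sub : ∀ z ∈ pvSkip ltb x big, z ∈ big :=
      fun z hz => (pvSkip_suffix ltb x big).sublist.mem hz
    rcases hsk : pvSkip ltb x big with _ | ⟨y, ys⟩
    · simp only [pvContains, hsk]
      constructor
      · intro h; cases h
      · intro h
        have : x ∈ pvSkip ltb x big := pvSkip_mem ltb hR x x (h x (by simp)) (hirr x)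
        rw [hsk] at this; cases this
    · rw [hsk] at hskip_pw hskip_sub
      rcases List.pairwise_cons.1 hskip_pw with ⟨hy_lt, hys_pw⟩
      by_cases hyx : y = x
      · subst hyx
        simp only [pvContains, hsk, BEq.rfl, if_true]
        rw [ih ys hxs hys_pw, List.forall_mem_cons]
        constructor
        · intro h
          exact ⟨hskip_sub y (by simp), fun z hz => hskip_sub z (List.mem_cons_of_mem _ (h z hz))⟩
        · rintro ⟨-, hrest⟩ z hz
          have hzy : ¬ R z y := fun hc => hirr y (htr y z y (hx z hz) hc)
          have : z ∈ pvSkip ltb y big := pvSkip_mem ltb hR y z (hrest z hz) hzy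
          rw [hsk] at this
          rcases List.mem_cons.1 this with rfl | hz'
          · exact absurd (hx z hz) (hirr z)
          · exact hz'
      · have hbeq : (y == x) = false := by simp [hyx]
        simp only [pvContains, hsk, hbeq, Bool.false_eq_true, if_false]
        constructor
        · intro h; cases h
        · intro h
          have hxmem : x ∈ pvSkip ltb x big := pvSkip_mem ltb hR x x (h x (by simp)) (hirr x)
          rw [hsk] at hxmem
          rcases List.mem_cons.1 hxmem with rfl | hxmem
          · exact hyx rfl
          · exact pvSkip_not_lt ltb hR htr x hb y (by rw [hsk]; simp) (hy_lt x hxmem)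

-- ---- the lexicographic order on edge pairs ----

def pvLex (a b : Int × Int) : Prop := a.1 < b.1 ∨ (a.1 = b.1 ∧ a.2 < b.2)

theorem pvPairLtB_iff (a b : Int × Int) : pvPairLtB a b = true ↔ pvLex a b := by
  simp [pvPairLtB, pvLex]

theorem pvLex_trans (a b c : Int × Int) : pvLex a b → pvLex b c → pvLex a c := by
  unfold pvLex; omega

theorem pvLex_irrefl (a : Int × Int) : ¬ pvLex a a := by unfold pvLex; omega

-- sorted2 with fst/snd keys is the insertion-sort foldl with the lexicographic 'before'
theorem pvSorted2_eq (xs : List (Int × Int)) :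
    PySem.List.sorted2 xs Prod.fst Prod.snd false =
      xs.foldl (fun acc x => PySem.List.insertBy
        (fun a b => decide (a.1 < b.1) || (!decide (b.1 < a.1) && decide (a.2 < b.2))) x acc) [] := rfl

-- insertBy keeps Pairwise R for any R compatible with the 'before' test
theorem pvInsertBy_pairwise {α : Type} {R : α → α → Prop} (before : α → α → Bool)
    (hT : ∀ a b, before a b = true → R a b) (hF : ∀ a b, before a b = false → R b a)
    (htr : ∀ a b c, R a b → R b c → R a c)
    (x : α) : ∀ {ys : List α}, ys.Pairwise R → (PySem.List.insertBy before x ys).Pairwise R := by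
  intro ys
  induction ys with
  | nil =>
    intro _
    simp [PySem.List.insertBy]
  | cons y ys ih =>
    intro hys
    rcases List.pairwise_cons.1 hys with ⟨hy, hys'⟩
    by_cases h : before x y
    · simp only [PySem.List.insertBy, h, if_true]
      refine List.pairwise_cons.2 ⟨?_, hys⟩
      intro z hz
      rcases List.mem_cons.1 hz with rfl | hz
      · exact hT x z h
      · exact htr x y z (hT x y h) (hy z hz)
    · simp only [PySem.List.insertBy, h]
      refine List.pairwise_cons.2 ⟨?_, ih hys'⟩
      intro z hz
      rcases (PySem.List.insertBy_mem_iff before x z ys).1 hz with rfl | hz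
      · exact hF z y (Bool.not_eq_true _ |>.mp h)
      · exact hy z hz

theorem pvFoldl_insertBy_pairwise {α : Type} {R : α → α → Prop} (before : α → α → Bool)
    (hT : ∀ a b, before a b = true → R a b) (hF : ∀ a b, before a b = false → R b a)
    (htr : ∀ a b c, R a b → R b c → R a c)
    (xs : List α) : ∀ {acc : List α}, acc.Pairwise R →
      (xs.foldl (fun acc x => PySem.List.insertBy before x acc) acc).Pairwise R := by
  induction xs with
  | nil => intro acc h; simpa using h
  | cons x xs ih =>
    intro acc h
    exact ih (pvInsertBy_pairwise before hT hF htr x h)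

-- the non-strict lexicographic order the insertion sort maintains
theorem pvEdges_pairwise_le (g : List (Int × List Int)) :
    (pvEdges g).Pairwise (fun a b => ¬ pvLex b a) := by
  unfold pvEdges
  rw [pvSorted2_eq]
  refine pvFoldl_insertBy_pairwise _ ?_ ?_ ?_ _ (by simp)
  · intro a b h
    have h' : a.1 < b.1 ∨ (¬ b.1 < a.1 ∧ a.2 < b.2) := by simpa using h
    unfold pvLex; omega
  · intro a b h
    have h' : b.1 ≤ a.1 ∧ (a.1 ≤ b.1 → b.2 ≤ a.2) := by simpa using h
    unfold pvLex; omega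
  · intro a b c; unfold pvLex; omega

theorem pvEdges_nodup (g : List (Int × List Int)) : (pvEdges g).Nodup := by
  unfold pvEdges
  exact (PySem.List.sorted2_perm _ _ _ _).nodup_iff.mpr (PySem.Set.nodup_ofList _)

theorem pvEdges_pairwise (g : List (Int × List Int)) : (pvEdges g).Pairwise pvLex := by
  refine ((pvEdges_pairwise_le g).and (pvEdges_nodup g)).imp ?_
  rintro a b ⟨h1, h2⟩
  unfold pvLex at h1 ⊢
  rcases a with ⟨a1, a2⟩; rcases b with ⟨b1, b2⟩
  have h2' : a1 ≠ b1 ∨ a2 ≠ b2 := by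
    by_contra hc
    push Not at hc
    exact h2 (by simp [hc.1, hc.2])
  omega

-- membership in the sorted deduplicated lists
theorem mem_pvNodes (g : List (Int × List Int)) (x : Int) :
    x ∈ pvNodes g ↔ x ∈ g.map (·.1) := by
  unfold pvNodes
  rw [PySem.List.mem_sorted, PySem.Set.mem_ofList]

theorem mem_pvEdges (g : List (Int × List Int)) (e : Int × Int) :
    e ∈ pvEdges g ↔ ∃ p ∈ g, e.1 = p.1 ∧ e.2 ∈ (pvLookup g p.1).getD [] := by
  unfold pvEdges
  rw [(PySem.List.sorted2_perm _ _ _ _).mem_iff, PySem.Set.mem_ofList]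
  simp only [List.mem_flatMap, List.mem_map]
  constructor
  · rintro ⟨p, hp, nb, hnb, rfl⟩
    exact ⟨p, hp, rfl, hnb⟩
  · rintro ⟨p, hp, h1, h2⟩
    exact ⟨p, hp, e.2, h2, by rw [← h1]⟩

theorem pvEdges_mem_of_key (g : List (Int × List Int)) (n nb : Int)
    (hk : n ∈ g.map (·.1)) (hnb : nb ∈ (pvLookup g n).getD []) : (n, nb) ∈ pvEdges g := by
  rw [mem_pvEdges]
  rcases List.mem_map.1 hk with ⟨p, hp, hp1⟩
  exact ⟨p, hp, by simp [hp1], by simpa [hp1] using hnb⟩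

-- the two merge scans together decide 'every subgraph entry satisfies pvCond'
theorem is_subgraph_alt_iff (graph subgraph : List (Int × List Int)) :
    is_subgraph_alt graph subgraph = true ↔ ∀ p ∈ subgraph, pvCond graph subgraph p := by
  unfold is_subgraph_alt
  have hnodes := pvContains_iff (R := fun a b : Int => a < b) pvIntLtB
    (by intro a b; simp [pvIntLtB]) (by intro a b c; omega) (by intro a; omega)
    (pvNodes subgraph) (pvNodes graph)
    (by unfold pvNodes; exact PySem.List.sorted_ofList_pairwise_lt _)
    (by unfold pvNodes; exact PySem.List.sorted_ofList_pairwise_lt _)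
  have hedges := pvContains_iff (R := pvLex) pvPairLtB pvPairLtB_iff pvLex_trans pvLex_irrefl
    (pvEdges subgraph) (pvEdges graph) (pvEdges_pairwise subgraph) (pvEdges_pairwise graph)
  rw [Bool.and_eq_true, hnodes, hedges]
  constructor
  · rintro ⟨hkeys, hed⟩ p hp
    have hk : p.1 ∈ graph.map (·.1) := by
      rw [← mem_pvNodes]
      exact hkeys p.1 ((mem_pvNodes subgraph p.1).2 (List.mem_map.2 ⟨p, hp, rfl⟩))
    refine ⟨hk, fun nb hnb => ?_⟩
    have : (p.1, nb) ∈ pvEdges graph :=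
      hed _ (pvEdges_mem_of_key subgraph p.1 nb (List.mem_map.2 ⟨p, hp, rfl⟩) hnb)
    rcases (mem_pvEdges graph _).1 this with ⟨q, hq, h1, h2⟩
    simpa [← h1] using h2
  · intro h
    constructor
    · intro k hk
      rw [mem_pvNodes] at hk ⊢
      rcases List.mem_map.1 hk with ⟨p, hp, rfl⟩
      exact (h p hp).1
    · intro e he
      rcases (mem_pvEdges subgraph e).1 he with ⟨p, hp, h1, h2⟩
      obtain ⟨hk, hnb⟩ := h p hp
      have : (p.1, e.2) ∈ pvEdges graph :=
        pvEdges_mem_of_key graph p.1 e.2 hk (hnb _ (by simpa [← h1] using h2))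
      simpa [← h1, ← Prod.mk.injEq] using this

-- ===== VERDICT (by name: the statement is the Claim_ definition above) =====
theorem is_subgraph_spec : Claim_equal_is_subgraph := by
  intro graph subgraph _
  unfold Spec_is_subgraph is_subgraph
  rw [Bool.eq_iff_iff, pvNodeLoop_iff, is_subgraph_alt_iff]
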